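-- pv_equiv track=rewrite | github.com/horimpark/code-playground | codewars/7kyu/Letterss of natac: build or buy.py | build_or_buy
-- ===== SOURCE A (Python) =====
-- objects = {
--     "bw": 'road',
--     "bwsg": 'settlement',
--     "ooogg": 'city',
--     "osg": 'development'
-- }
--
-- def build_or_buy(hand):
--     results = []
--     for key, object in objects.items():
--         key = [k for k in key]
--         hand_set = [h for h in hand]
--         for hs in hand_set:
--             if hs in key:
--                 key.remove(hs)
--         if len(key) == 0:
--             results.append(object)
--     return results
-- ===== SOURCE B (Python) =====
-- objects = {
--     "bw": 'road',
--     "bwsg": 'settlement',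
--     "ooogg": 'city',
--     "osg": 'development'
-- }
--
-- def build_or_buy(hand):
--     # One frequency table of the hand, then a cheap per-recipe count comparison.
--     hand_count = {}
--     for ch in hand:
--         hand_count[ch] = hand_count.get(ch, 0) + 1
--     return [obj for key, obj in objects.items()
--             if all(key.count(c) <= hand_count.get(c, 0) for c in key)]
-- ===== Notes on version B (the rewrite author's own statement) =====
-- stated objective: idiomatic
-- what changed: B builds one frequency table of the hand and selects recipes by count comparison, replacing A's per-recipe copy of the hand and destructive remove-from-list loop (4 hand scans with O(k) removals become 1 counting pass).
import Mathlib
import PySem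

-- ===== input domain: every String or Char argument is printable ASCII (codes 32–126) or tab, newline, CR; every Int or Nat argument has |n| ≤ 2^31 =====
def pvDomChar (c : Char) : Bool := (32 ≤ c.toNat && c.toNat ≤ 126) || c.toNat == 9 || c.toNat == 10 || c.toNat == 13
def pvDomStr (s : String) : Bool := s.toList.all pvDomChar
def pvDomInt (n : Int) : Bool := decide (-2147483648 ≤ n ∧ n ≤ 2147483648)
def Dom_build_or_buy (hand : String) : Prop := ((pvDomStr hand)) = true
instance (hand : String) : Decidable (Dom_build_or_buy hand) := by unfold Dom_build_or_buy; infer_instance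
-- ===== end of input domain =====

-- B replaces A's per-recipe hand copy and remove-from-list loop by one frequency
-- table of the hand followed by per-recipe count comparisons (idiomatic rewrite).

-- the module-level `objects` dict as an insertion-ordered association list
def pvObjects : List (String × String) :=
  [("bw", "road"), ("bwsg", "settlement"), ("ooogg", "city"), ("osg", "development")]

-- ===== PORT A =====
def build_or_buy (hand : String) : List String :=
  pvObjects.foldl (fun (results : List String) (ko : String × String) =>
    -- key = [k for k in key]; hand_set = [h for h in hand]
    let key0 := ko.1.toList
    let hand_set := hand.toList
    -- for hs in hand_set: if hs in key: key.remove(hs)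
    -- (list.remove on a present element = List.erase, first occurrence)
    let key := hand_set.foldl (fun k hs => if hs ∈ k then k.erase hs else k) key0
    if key.length = 0 then results ++ [ko.2] else results) []

-- ===== PORT B =====
def build_or_buy_alt (hand : String) : List String :=
  -- hand_count[ch] = hand_count.get(ch, 0) + 1, one pass over the hand
  let hand_count : PySem.Dict Char Int :=
    hand.toList.foldl (fun d ch => d.insert ch (d.getD ch 0 + 1)) PySem.Dict.empty
  -- [obj for key, obj in objects.items() if all(key.count(c) <= hand_count.get(c, 0) for c in key)]
  -- (str.count with a single-character needle = count of that char in the list of chars)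
  (pvObjects.filter (fun ko =>
    ko.1.toList.all (fun c => (ko.1.toList.count c : Int) ≤ hand_count.getD c 0))).map (·.2)

-- ===== PRECONDITION & SPEC =====
def Spec_build_or_buy (hand : String) (out : List String) : Prop := out = build_or_buy_alt hand
instance (hand : String) (out : List String) : Decidable (Spec_build_or_buy hand out) := by unfold Spec_build_or_buy; infer_instance

-- ===== CLAIM (what is proved, stated in full; the proofs are below) =====
def Claim_equal_build_or_buy : Prop := ∀ (hand : String), Dom_build_or_buy hand → Spec_build_or_buy hand (build_or_buy hand)

-- ===== LEMMAS AND PROOFS =====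

-- A's guarded removal step is exactly List.erase
theorem pvStep_eq_erase (k : List Char) (hs : Char) :
    (if hs ∈ k then k.erase hs else k) = k.erase hs := by
  by_cases h : hs ∈ k
  · simp [h]
  · simp [h, List.erase_of_not_mem h]

-- the remaining count of each letter after A's removal loop
-- the if-guarded loop is the plain erase loop
theorem pvFoldl_if_eq_erase (l : List Char) (key : List Char) :
    l.foldl (fun k hs => if hs ∈ k then k.erase hs else k) key
      = l.foldl (fun k hs => k.erase hs) key := by
  induction l generalizing key with
  | nil => rfl
  | cons h t ih => rw [List.foldl_cons, pvStep_eq_erase]; exact ih (key.erase h)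

theorem pvCount_foldl_erase (l : List Char) (key : List Char) (c : Char) :
    (l.foldl (fun k hs => k.erase hs) key).count c = key.count c - l.count c := by
  induction l generalizing key with
  | nil => simp
  | cons h t ih =>
      simp only [List.foldl_cons, ih, List.count_erase, List.count_cons]
      by_cases hc : (h == c) = true <;> simp only [hc, if_true, Bool.false_eq_true, reduceIte] <;> omega

theorem pvCount_foldl (l : List Char) (key : List Char) (c : Char) :
    (l.foldl (fun k hs => if hs ∈ k then k.erase hs else k) key).count c
      = key.count c - l.count c := by
  rw [pvFoldl_if_eq_erase, pvCount_foldl_erase]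

-- A's emptiness test equals B's count comparison for one recipe
theorem pvCond_iff (key : List Char) (hand : List Char) :
    ((hand.foldl (fun k hs => if hs ∈ k then k.erase hs else k) key).length = 0)
      ↔ (key.all (fun c => (key.count c : Int) ≤ ((hand.count c : Nat) : Int)) = true) := by
  rw [List.length_eq_zero_iff, List.eq_nil_iff_forall_not_mem]
  simp only [List.all_eq_true, decide_eq_true_eq]
  constructor
  · intro h c hc
    have := h c
    rw [← List.count_pos_iff] at this
    have hcount := pvCount_foldl hand key c
    have : (hand.foldl (fun k hs => if hs ∈ k then k.erase hs else k) key).count c = 0 := by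
      omega
    rw [hcount] at this
    exact_mod_cast Nat.le_of_sub_eq_zero this
  · intro h c hc
    rw [← List.count_pos_iff] at hc
    rw [pvCount_foldl] at hc
    by_cases hm : c ∈ key
    · have := h c hm
      have : key.count c ≤ hand.count c := by exact_mod_cast this
      omega
    · have : key.count c = 0 := List.count_eq_zero.mpr hm
      omega

-- B's frequency table looks up the hand's letter counts
theorem pvTable_getD (hand : List Char) (c : Char) :
    (hand.foldl (fun d ch => d.insert ch (d.getD ch 0 + 1))
        (PySem.Dict.empty : PySem.Dict Char Int)).getD c 0 = (hand.count c : Int) := by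
  rw [PySem.Dict.getD_foldl_insert_add_one]
  simp

theorem pvFoldl_eq_filterMap (hand : String) (ol : List (String × String)) (res : List String) :
    (ol.foldl (fun (results : List String) (ko : String × String) =>
        let key0 := ko.1.toList
        let hand_set := hand.toList
        let key := hand_set.foldl (fun k hs => if hs ∈ k then k.erase hs else k) key0
        if key.length = 0 then results ++ [ko.2] else results) res)
      = res ++ ((ol.filter (fun ko =>
          ko.1.toList.all (fun c => (ko.1.toList.count c : Int) ≤
            ((hand.toList.foldl (fun d ch => d.insert ch (d.getD ch 0 + 1))
              (PySem.Dict.empty : PySem.Dict Char Int)).getD c 0)))).map (·.2)) := by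
  induction ol generalizing res with
  | nil => simp
  | cons ko t ih =>
      simp only [List.foldl_cons, List.filter_cons]
      have hcond : ((hand.toList.foldl (fun k hs => if hs ∈ k then k.erase hs else k) ko.1.toList).length = 0)
          ↔ (ko.1.toList.all (fun c => (ko.1.toList.count c : Int) ≤
              ((hand.toList.foldl (fun d ch => d.insert ch (d.getD ch 0 + 1))
                (PySem.Dict.empty : PySem.Dict Char Int)).getD c 0)) = true) := by
        rw [pvCond_iff ko.1.toList hand.toList]
        constructor <;> intro h <;> (simp only [List.all_eq_true] at h ⊢) <;>
          intro c hc <;> have := h c hc <;> rw [pvTable_getD] at * <;> exact_mod_cast this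
      by_cases h : (hand.toList.foldl (fun k hs => if hs ∈ k then k.erase hs else k) ko.1.toList).length = 0
      · rw [if_pos h, hcond.mp h, ih]; simp
      · rw [if_neg h, ih]
        have : ¬ (ko.1.toList.all (fun c => (ko.1.toList.count c : Int) ≤
              ((hand.toList.foldl (fun d ch => d.insert ch (d.getD ch 0 + 1))
                (PySem.Dict.empty : PySem.Dict Char Int)).getD c 0)) = true) := fun hb => h (hcond.mpr hb)
        simp [this]

-- ===== VERDICT (by name: the statement is the Claim_ definition above) =====
theorem build_or_buy_spec : Claim_equal_build_or_buy := by
  intro hand _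
  unfold Spec_build_or_buy build_or_buy build_or_buy_alt
  simpa using pvFoldl_eq_filterMap hand pvObjects []
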